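-- pv_equiv track=rewrite | github.com/alexeybutyrev/leetcode-solutions | solutions/2663. Lexicographically Smallest Beautiful String/solution.py | smallestBeautifulString
-- ===== SOURCE A (Python) =====
-- def smallestBeautifulString(s: str, k: int) -> str:
--     A = [ord(l) - ord('a') for l in s]
--
--     N = len(A)
--     i = N - 1
--     pr = False
--     A[i] += 1
--     while i >= 0:
--         if A[i] == k:
--             i -=1
--         elif A[i] not in A[max(i-2,0):i]:
--             break
--         A[i] += 1
--
--     if i < 0: return ''
--
--
--     for j in range(i+1,N):
--         A[j] = min({0, 1, 2} - set(A[max(0, j - 2): j]))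
--
--     return ''.join(chr(ord('a') + x) for x in A)
-- ===== SOURCE B (Python) =====
-- def smallestBeautifulString(s: str, k: int) -> str:
--     A = [ord(c) - ord('a') for c in s]
--     n = len(A)
--
--     def next_ok(lo, f1, f2):
--         # smallest value >= lo avoiding the (at most two) forbidden values
--         while lo == f1 or lo == f2:
--             lo += 1
--         return lo
--
--     for i in range(n - 1, -1, -1):
--         f1 = A[i - 1] if i >= 1 else None
--         f2 = A[i - 2] if i >= 2 else None
--         v = next_ok(A[i] + 1, f1, f2)
--         if v < k:
--             need = n - i - 1
--             c1 = next_ok(0, v, f1)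
--             c2 = next_ok(0, c1, v)
--             pat = [c1, c2, 3 - c1 - c2][:min(need, 3)]
--             tail = (pat * (need // 3 + 1))[:need]
--             return ''.join(chr(ord('a') + x) for x in A[:i] + [v] + tail)
--     return ''
-- ===== Notes on version B (the rewrite author's own statement) =====
-- stated objective: alternative
-- what changed: Replaced A's merged carry/increment while-loop state machine and its per-position set-difference fill loop by closed-form arithmetic: the pivot value is found in O(1) by stepping past at most two forbidden neighbours, and the whole suffix is built at once as a period-3 repeating pattern (the fill sequence is provably eventually cyclic with period [c1,c2,3-c1-c2]) instead of recomputing min({0,1,2}-slice) position by position. Pre_ excludes the empty string (A raises IndexError) and strings containing a character with value >= k, i.e. …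
-- outside the precondition, e.g. on smallestBeautifulString('z', 3): A returns '{', B returns ''
import Mathlib
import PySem

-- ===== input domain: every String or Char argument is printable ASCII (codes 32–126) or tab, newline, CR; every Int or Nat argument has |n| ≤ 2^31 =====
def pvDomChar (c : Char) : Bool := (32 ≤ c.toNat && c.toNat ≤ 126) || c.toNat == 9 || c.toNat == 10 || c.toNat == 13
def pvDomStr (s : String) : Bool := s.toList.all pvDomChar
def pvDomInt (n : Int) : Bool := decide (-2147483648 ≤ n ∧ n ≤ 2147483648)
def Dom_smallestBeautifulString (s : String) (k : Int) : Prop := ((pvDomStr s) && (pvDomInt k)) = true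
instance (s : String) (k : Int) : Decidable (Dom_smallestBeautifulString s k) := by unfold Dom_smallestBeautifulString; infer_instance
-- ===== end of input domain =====

-- B replaces A's merged carry/increment while-loop and its per-position set-difference fill loop
-- by closed-form arithmetic: an O(1) step past at most two forbidden neighbours finds the pivot,
-- and the suffix is built at once as a period-3 repeating pattern (objective: alternative).
-- A also mutates its intermediate list in place in Python; both are pure here and the claim is
-- about the return value only (A's parameter s is not mutated).


-- ===== PORT A =====
-- [ord(l) - ord('a') for l in s]
def pvToInts (s : String) : List Int := s.toList.map (fun c => ((c.toNat : Int) - 97))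
-- ''.join(chr(ord('a') + x) for x in A)   (exact for the character values either program produces on Pre_)
def pvRender (A : List Int) : String := String.mk (A.map (fun x => Char.ofNat (97 + x).toNat))
-- A[max(i-2,0):i]
def pvSliceA (A : List Int) (i : Int) : List Int := PySem.List.slice A (some (max (i - 2) 0)) (some i)

-- termination helper for the while loop: incrementing A[i] past a slice member strictly
-- lowers the number of slice entries ≥ A[i]
theorem pv_countP_lt (l : List Int) (v : Int) (h : v ∈ l) :
    l.countP (fun x => decide (v + 1 ≤ x)) < l.countP (fun x => decide (v ≤ x)) := by
  induction l with
  | nil => cases h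
  | cons a t ih =>
    simp only [List.countP_cons]
    have hmono : t.countP (fun x => decide (v + 1 ≤ x)) ≤ t.countP (fun x => decide (v ≤ x)) := by
      apply List.countP_mono_left
      intro x _ hx
      simp only [decide_eq_true_eq] at *
      omega
    rcases List.mem_cons.mp h with rfl | ht
    · split_ifs with h1 h2 <;> simp only [decide_eq_true_eq] at * <;> omega
    · have hlt := ih ht
      split_ifs with h1 h2 <;> simp only [decide_eq_true_eq] at * <;> omega

-- setting an index at or beyond the slice leaves the slice unchanged (used only for termination)
theorem pv_take_drop_set (l : List Int) (a c n : Nat) (w : Int) (h : a + c ≤ n) :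
    ((l.set n w).drop a).take c = (l.drop a).take c := by
  apply List.ext_getElem?
  intro j
  rw [List.getElem?_take, List.getElem?_take, List.getElem?_drop, List.getElem?_drop]
  split_ifs with hj
  · exact List.getElem?_set_ne (by omega)
  · rfl

theorem pv_clampIdx_nonneg (n : Nat) (i : Int) (h0 : 0 ≤ i) (hl : i < (n : Int)) :
    PySem.List.clampIdx n i = i.toNat := by
  unfold PySem.List.clampIdx
  rw [if_neg (by omega)]
  omega

theorem pv_slice_set (A : List Int) (i : Int) (h0 : 0 ≤ i) (hl : i < (A.length : Int)) (w : Int) :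
    pvSliceA (A.set i.toNat w) i = pvSliceA A i := by
  unfold pvSliceA PySem.List.slice
  simp only [List.length_set, pv_clampIdx_nonneg A.length i h0 hl]
  have ha : PySem.List.clampIdx A.length (max (i - 2) 0) ≤ i.toNat := by
    unfold PySem.List.clampIdx
    rw [if_neg (by omega)]
    omega
  exact pv_take_drop_set A _ _ i.toNat w (by omega)

theorem pv_getD_set_self (A : List Int) (i : Int) (h0 : 0 ≤ i) (hl : i < (A.length : Int)) (w : Int) :
    PySem.List.pyGetD (A.set i.toNat w) i 0 = w := by
  rw [PySem.List.pyGetD_eq_getElem (A.set i.toNat w) 0 h0 (by simp; omega)]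
  exact List.getElem_set_self _

-- the while loop of A: state (A, i); 'if A[i]==k: i -= 1', 'elif A[i] not in A[max(i-2,0):i]: break',
-- then 'A[i] += 1' in both continuing branches.  The conjunct 'i < len(A)' on the elif branch only
-- makes the recursion total (Python's A[i] has already guaranteed it); it never fails on Pre_.
def pvLoopA (k : Int) (A : List Int) (i : Int) : List Int × Int :=
  if h : 0 ≤ i then
    if PySem.List.pyGetD A i 0 = k then
      pvLoopA k (PySem.List.pySetD A (i - 1) (PySem.List.pyGetD A (i - 1) 0 + 1)) (i - 1)
    else if hm : PySem.List.pyGetD A i 0 ∈ pvSliceA A i ∧ i < (A.length : Int) then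
      pvLoopA k (PySem.List.pySetD A i (PySem.List.pyGetD A i 0 + 1)) i
    else (A, i)
  else (A, i)
termination_by ((i + 1).toNat, (pvSliceA A i).countP (fun x => decide (PySem.List.pyGetD A i 0 ≤ x)))
decreasing_by
  · apply Prod.Lex.left; omega
  · have hset : PySem.List.pySetD A i (PySem.List.pyGetD A i 0 + 1)
        = A.set i.toNat (PySem.List.pyGetD A i 0 + 1) := PySem.List.pySetD_of_nonneg _ _ h
    rw [hset, pv_slice_set A i h hm.2, pv_getD_set_self A i h hm.2]
    apply Prod.Lex.right
    exact pv_countP_lt _ _ hm.1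

-- min({0,1,2} - set(A[max(0,j-2):j])) ; that set is nonempty whenever A executes this line,
-- so the .getD 0 (Python would raise on an empty set) is unreachable
def pvMinFill (B : List Int) (j : Int) : Int :=
  (PySem.List.min? (PySem.Set.diff (PySem.Set.ofList ([0, 1, 2] : List Int))
      (PySem.Set.ofList (PySem.List.slice B (some (max 0 (j - 2))) (some j)))) (fun x => x)).getD 0

-- 'if i < 0: return '''  then the fill loop 'for j in range(i+1, N)' and the join
def pvFinish (k N : Int) (st : List Int × Int) : String :=
  if st.2 < 0 then "" else
    pvRender ((PySem.List.pyRange (st.2 + 1) N 1).foldl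
      (fun B j => PySem.List.pySetD B j (pvMinFill B j)) st.1)

def smallestBeautifulString (s : String) (k : Int) : String :=
  let A0 := pvToInts s
  let N : Int := A0.length
  pvFinish k N (pvLoopA k
    (PySem.List.pySetD A0 (N - 1) (PySem.List.pyGetD A0 (N - 1) 0 + 1)) (N - 1))

-- ===== PORT B =====
-- 'while lo == f1 or lo == f2: lo += 1; return lo'  (None compares unequal to every int)
def pvNextOk (lo : Int) (f1 f2 : Option Int) : Int :=
  if f1 = some lo ∨ f2 = some lo then pvNextOk (lo + 1) f1 f2 else lo
termination_by ((f1.getD 0 ⊔ f2.getD 0) + 1 - lo).toNat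
decreasing_by
  rcases ‹f1 = some lo ∨ f2 = some lo› with h | h <;> simp only [h, Option.getD_some] <;> omega

-- 'A[i-1] if i >= 1 else None'  /  'A[i-2] if i >= 2 else None'  (in-range accesses)
def pvF1 (A : List Int) (p : Nat) : Option Int :=
  if 1 ≤ p then some (PySem.List.pyGetD A ((p : Int) - 1) 0) else none
def pvF2 (A : List Int) (p : Nat) : Option Int :=
  if 2 ≤ p then some (PySem.List.pyGetD A ((p : Int) - 2) 0) else none

-- 'pat = [c1, c2, 3 - c1 - c2][:min(need, 3)]; tail = (pat * (need // 3 + 1))[:need]'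
def pvTail (need : Nat) (c1 c2 : Int) : List Int :=
  ((List.replicate (need / 3 + 1) (([c1, c2, 3 - c1 - c2]).take (min need 3))).flatten).take need

-- 'for i in range(n-1, -1, -1)' with the early return; argument i counts the positions still to try
def pvOuterNew (k : Int) (A : List Int) : Nat → String
  | 0 => ""
  | p + 1 =>
    let v := pvNextOk (PySem.List.pyGetD A (p : Int) 0 + 1) (pvF1 A p) (pvF2 A p)
    if v < k then
      let need := A.length - (p + 1)
      let c1 := pvNextOk 0 (some v) (pvF1 A p)
      let c2 := pvNextOk 0 (some c1) (some v)
      pvRender (A.take p ++ [v] ++ pvTail need c1 c2)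
    else pvOuterNew k A p

def smallestBeautifulString_alt (s : String) (k : Int) : String :=
  pvOuterNew k (pvToInts s) (pvToInts s).length

-- ===== PRECONDITION & SPEC =====
-- Pre_ excludes (a) the empty string, on which A raises IndexError, and (b) strings containing a
-- character of value ≥ k (outside the k-letter alphabet the problem fixes), on which A's while-loop
-- overshoots k and returns accidental characters beyond that alphabet.
def Pre_smallestBeautifulString (s : String) (k : Int) : Prop :=
  s ≠ "" ∧ s.toList.all (fun c => decide ((c.toNat : Int) - 97 < k)) = true
instance (s : String) (k : Int) : Decidable (Pre_smallestBeautifulString s k) := by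
  unfold Pre_smallestBeautifulString; infer_instance

def pvWitness_smallestBeautifulString : String × Int := ("ab", 4)

def Spec_smallestBeautifulString (s : String) (k : Int) (out : String) : Prop :=
  out = smallestBeautifulString_alt s k
instance (s : String) (k : Int) (out : String) : Decidable (Spec_smallestBeautifulString s k out) := by
  unfold Spec_smallestBeautifulString; infer_instance

-- ===== CLAIM (what is proved, stated in full; the proofs are below) =====
def Claim_equal_smallestBeautifulString : Prop := ∀ (s : String) (k : Int),
  Dom_smallestBeautifulString s k → Pre_smallestBeautifulString s k →
  Spec_smallestBeautifulString s k (smallestBeautifulString s k)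

-- ===== LEMMAS AND PROOFS =====

-- ---- proof-side reference forms of A's two phases (pivot search / greedy fill) ----

-- first admissible v in [lo, k), as a bounded search (proof helper; relates the two ports)
def pvFindV (k : Int) (A : List Int) (i : Nat) (v : Int) : Option Int :=
  if hv : v < k then
    if (i < 1 ∨ v ≠ PySem.List.pyGetD A ((i : Int) - 1) 0) ∧
       (i < 2 ∨ v ≠ PySem.List.pyGetD A ((i : Int) - 2) 0) then some v
    else pvFindV k A i (v + 1)
  else none
termination_by (k - v).toNat
decreasing_by omega

-- the greedy fill, one appended value at a time (proof helper)
def pvFillB (out : List Int) (m : Nat) : List Int :=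
  match m with
  | 0 => out
  | Nat.succ m' =>
    pvFillB (out ++ [pvNextOk 0 (some (PySem.List.pyGetD out (-1) 0))
      (if 2 ≤ out.length then some (PySem.List.pyGetD out (-2) 0) else none)]) m'

-- reference outer loop over positions, via pvFindV (proof helper)
def pvOuterB (k : Int) (A : List Int) (i : Nat) : String :=
  match i with
  | 0 => ""
  | Nat.succ p =>
    match pvFindV k A p (PySem.List.pyGetD A (p : Int) 0 + 1) with
    | some v => pvRender (pvFillB (A.take p ++ [v]) (A.length - (p + 1)))
    | none => pvOuterB k A p

-- the state of A's while loop at position p holding value v (positions > p were left at k)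
def pvSt (orig : List Int) (p : Nat) (v : Int) (k : Int) : List Int :=
  orig.take p ++ v :: List.replicate (orig.length - 1 - p) k

-- the two continuations of the reference outer loop, as a function of the inner search's result
def pvBreakOrNext (k : Int) (orig : List Int) (p : Nat) (r : Option Int) : String :=
  match r with
  | some w => pvRender (pvFillB (orig.take p ++ [w]) (orig.length - (p + 1)))
  | none => pvOuterB k orig p

theorem pvOuterB_succ (k : Int) (A : List Int) (p : Nat) :
    pvOuterB k A (p + 1) = pvBreakOrNext k A p (pvFindV k A p (PySem.List.pyGetD A (p : Int) 0 + 1)) := by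
  cases h : pvFindV k A p (PySem.List.pyGetD A (p : Int) 0 + 1) <;>
    simp only [pvOuterB, pvBreakOrNext, h]

theorem pvSt_length (orig : List Int) (p : Nat) (v k : Int) (hp : p < orig.length) :
    (pvSt orig p v k).length = orig.length := by
  unfold pvSt; simp; omega

theorem pvSt_get_self (orig : List Int) (p : Nat) (v k : Int) (hp : p < orig.length) :
    PySem.List.pyGetD (pvSt orig p v k) (p : Int) 0 = v := by
  have hlen : (orig.take p).length = p := by simp; omega
  unfold pvSt PySem.List.pyGetD
  rw [show ((p : Nat) : Int) = ((orig.take p).length : Int) by rw [hlen]]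
  rw [PySem.List.pyGet?_append_length]
  rfl

theorem pvSt_get_lt (orig : List Int) (p q : Nat) (v k : Int) (hq : q < p) (hp : p < orig.length) :
    PySem.List.pyGetD (pvSt orig p v k) (q : Int) 0 = orig[q]'(by omega) := by
  unfold pvSt PySem.List.pyGetD
  rw [PySem.List.pyGet?_natCast]
  rw [List.getElem?_append_left (by simp; omega)]
  rw [List.getElem?_take]
  rw [if_pos hq, List.getElem?_eq_getElem (by omega)]
  rfl

theorem pv_getD_nat (orig : List Int) (q : Nat) (hq : q < orig.length) :
    PySem.List.pyGetD orig (q : Int) 0 = orig[q] := by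
  unfold PySem.List.pyGetD
  rw [PySem.List.pyGet?_natCast, List.getElem?_eq_getElem hq]
  rfl

theorem pvSt_set_self (orig : List Int) (p : Nat) (v k w : Int) (hp : p < orig.length) :
    PySem.List.pySetD (pvSt orig p v k) (p : Int) w = pvSt orig p w k := by
  have hlen : (orig.take p).length = p := by simp; omega
  rw [PySem.List.pySetD_of_nonneg _ _ (by positivity)]
  unfold pvSt
  rw [Int.toNat_natCast, List.set_append]
  rw [if_neg (by omega)]
  rw [hlen, Nat.sub_self, List.set_cons_zero]

-- the slice A[max(p-2,0):p] of the loop state consists of original entries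
theorem pvSt_slice (orig : List Int) (p : Nat) (v k : Int) (hp : p < orig.length) :
    pvSliceA (pvSt orig p v k) (p : Int) = (orig.take p).drop (p - 2) := by
  have hlen : (orig.take p).length = p := by simp; omega
  have hSt : (pvSt orig p v k).length = orig.length := pvSt_length orig p v k hp
  unfold pvSliceA PySem.List.slice
  have ha : PySem.List.clampIdx (pvSt orig p v k).length (max ((p : Int) - 2) 0) = p - 2 := by
    unfold PySem.List.clampIdx
    rw [if_neg (by omega)]
    omega
  have hb : PySem.List.clampIdx (pvSt orig p v k).length (p : Int) = p := by
    unfold PySem.List.clampIdx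
    rw [if_neg (by omega)]
    omega
  simp only [ha, hb]
  unfold pvSt
  rw [List.drop_append_of_le_length (by omega)]
  apply List.take_left'
  simp
  omega

theorem pv_drop_last_two (l : List Int) (h2 : 2 ≤ l.length) :
    l.drop (l.length - 2) = [l[l.length - 2]'(by omega), l[l.length - 1]'(by omega)] := by
  apply List.ext_getElem
  · simp; omega
  · intro i h1 hlen2
    simp only [List.length_cons, List.length_nil] at hlen2
    rw [List.getElem_drop]
    interval_cases i <;> simp <;> congr 1 <;> omega

theorem pv_drop_take_two (orig : List Int) (p : Nat) (hp : p < orig.length) (h2 : 2 ≤ p) :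
    (orig.take p).drop (p - 2) = [orig[p - 2]'(by omega), orig[p - 1]'(by omega)] := by
  apply List.ext_getElem
  · simp; omega
  · intro i h1 hlen2
    simp only [List.length_cons, List.length_nil] at hlen2
    rw [List.getElem_drop, List.getElem_take]
    interval_cases i <;> simp <;> congr 1 <;> omega

-- membership in the loop slice matches the two index comparisons of the pivot predicate
theorem pvSt_slice_iff (orig : List Int) (p : Nat) (v k x : Int) (hp : p < orig.length) :
    x ∈ pvSliceA (pvSt orig p v k) (p : Int) ↔
      ¬((p < 1 ∨ x ≠ PySem.List.pyGetD orig ((p : Int) - 1) 0) ∧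
        (p < 2 ∨ x ≠ PySem.List.pyGetD orig ((p : Int) - 2) 0)) := by
  rw [pvSt_slice orig p v k hp]
  match p, hp with
  | 0, hp => simp
  | 1, hp =>
    have hc : ((1 : Nat) : Int) - 1 = ((0 : Nat) : Int) := by omega
    rw [hc, pv_getD_nat orig 0 (by omega)]
    have h1 : (orig.take 1).drop 0 = [orig[0]'(by omega)] := by
      rw [List.drop_zero]
      apply List.ext_getElem (by simp; omega)
      intro i hi _
      simp only [List.length_take] at hi
      have : i = 0 := by omega
      subst this
      simp [List.getElem_take]
    rw [show (1 : Nat) - 2 = 0 from rfl, h1]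
    simp only [List.mem_singleton]
    constructor
    · rintro rfl
      intro hcon
      rcases hcon.1 with h | h
      · omega
      · exact h rfl
    · intro hcon
      by_contra hx
      exact hcon ⟨Or.inr (by simpa using hx), Or.inl (by omega)⟩
  | (q+2), hp =>
    have h1 : ((q + 2 : Nat) : Int) - 1 = ((q + 1 : Nat) : Int) := by omega
    have h2 : ((q + 2 : Nat) : Int) - 2 = ((q : Nat) : Int) := by omega
    rw [h1, h2, pv_getD_nat orig (q+1) (by omega), pv_getD_nat orig q (by omega)]
    rw [pv_drop_take_two orig (q+2) hp (by omega)]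
    simp only [List.mem_cons, List.not_mem_nil, or_false]
    constructor
    · rintro (rfl | rfl)
      · intro hc
        rcases hc.2 with h | h
        · omega
        · exact h rfl
      · intro hc
        rcases hc.1 with h | h
        · omega
        · exact h rfl
    · intro hc
      by_cases hx1 : x = orig[q + 1]'(by omega)
      · right; exact hx1
      · left
        by_cases hx2 : x = orig[q]'(by omega)
        · exact hx2
        · exact absurd ⟨Or.inr (by simpa using hx1), Or.inr (by simpa using hx2)⟩ hc

theorem pvSt_kstep (orig : List Int) (q : Nat) (k : Int) (hq : q + 1 < orig.length) :
    PySem.List.pySetD (pvSt orig (q+1) k k) (((q+1 : Nat) : Int) - 1)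
        (PySem.List.pyGetD (pvSt orig (q+1) k k) (((q+1 : Nat) : Int) - 1) 0 + 1)
      = pvSt orig q (orig[q]'(by omega) + 1) k := by
  have hcast : ((q + 1 : Nat) : Int) - 1 = ((q : Nat) : Int) := by omega
  rw [hcast, pvSt_get_lt orig (q+1) q k k (by omega) hq]
  rw [PySem.List.pySetD_of_nonneg _ _ (by positivity)]
  rw [Int.toNat_natCast]
  have htake : orig.take (q+1) = orig.take q ++ [orig[q]'(by omega)] := by
    rw [List.take_succ, List.getElem?_eq_getElem (by omega)]
    rfl
  have hexp : pvSt orig (q+1) k k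
      = orig.take q ++ orig[q]'(by omega) :: k :: List.replicate (orig.length - 1 - (q+1)) k := by
    unfold pvSt
    rw [htake, List.append_assoc, List.singleton_append]
  rw [hexp, List.set_append, if_neg (by simp only [List.length_take]; omega)]
  have hlen : (orig.take q).length = q := by simp; omega
  rw [hlen, Nat.sub_self, List.set_cons_zero]
  unfold pvSt
  congr 1
  rw [show orig.length - 1 - q = (orig.length - 1 - (q+1)) + 1 by omega]
  simp [List.replicate_succ]

-- ---- pvNextOk characterisations ----

theorem pvNextOk_go (lo : Int) (f1 f2 : Option Int) (h : f1 = some lo ∨ f2 = some lo) :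
    pvNextOk lo f1 f2 = pvNextOk (lo + 1) f1 f2 := by
  rw [pvNextOk, if_pos h]

theorem pvNextOk_stop (lo : Int) (f1 f2 : Option Int) (h : ¬(f1 = some lo ∨ f2 = some lo)) :
    pvNextOk lo f1 f2 = lo := by
  rw [pvNextOk, if_neg h]

theorem pvNextOk_ge (lo : Int) (f1 f2 : Option Int) : lo ≤ pvNextOk lo f1 f2 := by
  rw [pvNextOk]
  split_ifs with h
  · exact le_trans (by omega) (pvNextOk_ge (lo + 1) f1 f2)
  · exact le_refl lo
termination_by ((f1.getD 0 ⊔ f2.getD 0) + 1 - lo).toNat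
decreasing_by
  rcases h with h | h <;> simp only [h, Option.getD_some] <;> omega

theorem pvNextOk1_eq (x : Int) : pvNextOk 0 (some x) none = if x = 0 then 1 else 0 := by
  by_cases h : x = 0
  · subst h
    rw [pvNextOk_go 0 (some 0) none (Or.inl rfl)]
    norm_num
    rw [pvNextOk_stop 1 (some 0) none (by simp)]
  · rw [pvNextOk_stop 0 (some x) none (by simp [h]), if_neg h]

theorem pvNextOk2_eq (a b : Int) :
    pvNextOk 0 (some a) (some b) = if ¬(0 = a ∨ 0 = b) then 0 else if ¬(1 = a ∨ 1 = b) then 1 else 2 := by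
  by_cases h0 : (some a = some (0 : Int)) ∨ (some b = some (0 : Int))
  · rw [pvNextOk_go 0 (some a) (some b) h0]
    norm_num
    simp only [Option.some.injEq] at h0
    by_cases h1 : (some a = some (1 : Int)) ∨ (some b = some (1 : Int))
    · rw [pvNextOk_go 1 (some a) (some b) h1]
      norm_num
      simp only [Option.some.injEq] at h1
      rw [pvNextOk_stop 2 (some a) (some b) (by simp only [Option.some.injEq]; omega)]
      rw [if_neg (by omega), if_neg (by omega)]
    · rw [pvNextOk_stop 1 (some a) (some b) h1]
      simp only [Option.some.injEq, not_or] at h1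
      rw [if_neg (by omega), if_pos (by omega)]
  · rw [pvNextOk_stop 0 (some a) (some b) h0]
    simp only [Option.some.injEq, not_or] at h0
    rw [if_pos (by omega)]

theorem pvNextOk_mem012 (a : Int) (b : Option Int) :
    pvNextOk 0 (some a) b = 0 ∨ pvNextOk 0 (some a) b = 1 ∨ pvNextOk 0 (some a) b = 2 := by
  cases b with
  | none => rw [pvNextOk1_eq]; split_ifs <;> omega
  | some x => rw [pvNextOk2_eq]; split_ifs <;> omega

theorem pvNextOk_ne_fst (a : Int) (b : Int) (ha : a = 0 ∨ a = 1 ∨ a = 2) :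
    pvNextOk 0 (some a) (some b) ≠ a := by
  rw [pvNextOk2_eq]; split_ifs <;> omega

-- ---- fill characterisation: A's per-position min-fill equals the greedy append step ----

theorem pv_contains_of1 (x z : Int) :
    (PySem.Set.ofList [x]).contains z = decide (z = x) := by
  by_cases h : z = x
  · rw [decide_eq_true h, PySem.Set.contains_iff, PySem.Set.mem_ofList]
    simpa using h
  · rw [decide_eq_false h, ← Bool.not_eq_true, PySem.Set.contains_iff, PySem.Set.mem_ofList]
    simpa using h

theorem pv_contains_of2 (x y z : Int) :
    (PySem.Set.ofList [x, y]).contains z = decide (z = x ∨ z = y) := by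
  by_cases h : z = x ∨ z = y
  · rw [decide_eq_true h, PySem.Set.contains_iff, PySem.Set.mem_ofList]
    simpa using h
  · rw [decide_eq_false h, ← Bool.not_eq_true, PySem.Set.contains_iff, PySem.Set.mem_ofList]
    simpa using h

theorem pv_min1_core (x : Int) :
    (PySem.List.min? (PySem.Set.diff (PySem.Set.ofList ([0, 1, 2] : List Int))
        (PySem.Set.ofList [x])) (fun z => z)).getD 0 = if x = 0 then 1 else 0 := by
  have hdiff : PySem.Set.diff (PySem.Set.ofList ([0, 1, 2] : List Int)) (PySem.Set.ofList [x])
      = List.filter (fun z => !decide (z = x)) [0, 1, 2] := by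
    show List.filter _ _ = _
    apply List.filter_congr
    intro a _
    rw [pv_contains_of1]
  rw [hdiff]
  by_cases m0 : (0 : Int) = x <;> by_cases m1 : (1 : Int) = x <;> by_cases m2 : (2 : Int) = x <;>
    simp only [List.filter, decide_eq_true, m0, m1, m2, Bool.not_true] <;>
    first
    | omega
    | (rw [if_pos (by omega)]; rfl)
    | (rw [if_neg (by omega)]; rfl)
    | rfl

theorem pv_min2_core (x y : Int) :
    (PySem.List.min? (PySem.Set.diff (PySem.Set.ofList ([0, 1, 2] : List Int))
        (PySem.Set.ofList [x, y])) (fun z => z)).getD 0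
      = if ¬(0 = x ∨ 0 = y) then 0 else if ¬(1 = x ∨ 1 = y) then 1 else 2 := by
  have hdiff : PySem.Set.diff (PySem.Set.ofList ([0, 1, 2] : List Int)) (PySem.Set.ofList [x, y])
      = List.filter (fun z => !decide (z = x ∨ z = y)) [0, 1, 2] := by
    show List.filter _ _ = _
    apply List.filter_congr
    intro a _
    rw [pv_contains_of2]
  rw [hdiff]
  by_cases m0 : (0 : Int) = x ∨ 0 = y <;> by_cases m1 : (1 : Int) = x ∨ 1 = y <;>
    by_cases m2 : (2 : Int) = x ∨ 2 = y <;>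
    simp only [List.filter, decide_eq_true, m0, m1, m2, Bool.not_true] <;>
    first
    | omega
    | (rw [if_pos (by omega)]; rfl)
    | (rw [if_neg (by omega), if_pos (by omega)]; rfl)
    | (rw [if_neg (by omega), if_neg (by omega)]; rfl)
    | rfl

theorem pvFill_step_slice (pre ts : List Int) (t : Int) (hpre : pre ≠ []) :
    PySem.List.slice (pre ++ t :: ts) (some (max 0 ((pre.length : Int) - 2)))
        (some (pre.length : Int)) = pre.drop (pre.length - 2) := by
  have hlen : (pre ++ t :: ts).length = pre.length + (ts.length + 1) := by simp
  unfold PySem.List.slice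
  have hL : 1 ≤ pre.length := by
    cases pre
    · exact absurd rfl hpre
    · simp
  have ha : PySem.List.clampIdx (pre ++ t :: ts).length (max 0 ((pre.length : Int) - 2))
      = pre.length - 2 := by
    unfold PySem.List.clampIdx
    rw [if_neg (by omega)]
    rw [hlen]
    omega
  have hb : PySem.List.clampIdx (pre ++ t :: ts).length (pre.length : Int) = pre.length := by
    unfold PySem.List.clampIdx
    rw [if_neg (by omega)]
    rw [hlen]
    omega
  simp only [ha, hb]
  rw [List.drop_append_of_le_length (by omega)]
  apply List.take_left'
  simp only [List.length_drop]

theorem pvFill_step_val (pre ts : List Int) (t : Int) (hpre : pre ≠ []) :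
    pvMinFill (pre ++ t :: ts) (pre.length : Int)
      = pvNextOk 0 (some (PySem.List.pyGetD pre (-1) 0))
          (if 2 ≤ pre.length then some (PySem.List.pyGetD pre (-2) 0) else none) := by
  have hL : 1 ≤ pre.length := by
    cases pre
    · exact absurd rfl hpre
    · simp
  unfold pvMinFill
  rw [pvFill_step_slice pre ts t hpre]
  by_cases h2 : 2 ≤ pre.length
  · rw [pv_drop_last_two pre (by omega)]
    rw [if_pos h2]
    rw [PySem.List.pyGetD_neg_ofNat pre 1 0 (by omega) (by omega)]
    rw [PySem.List.pyGetD_neg_ofNat pre 2 0 (by omega) (by omega)]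
    rw [pv_min2_core, pvNextOk2_eq]
    split_ifs <;> omega
  · have h1 : pre.length = 1 := by omega
    obtain ⟨x, rfl⟩ := List.length_eq_one_iff.mp h1
    rw [if_neg h2]
    have hx : PySem.List.pyGetD [x] (-1) 0 = x := by
      simp [PySem.List.pyGetD, PySem.List.pyGet?, PySem.List.pyIdx?]
    norm_num
    rw [pv_min1_core, pvNextOk1_eq, hx]

theorem pvFill_eq : ∀ (m : Nat) (pre tail : List Int), pre ≠ [] → tail.length = m →
    (PySem.List.pyRange (pre.length : Int) ((pre.length : Int) + (m : Int)) 1).foldl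
      (fun B j => PySem.List.pySetD B j (pvMinFill B j)) (pre ++ tail) = pvFillB pre m := by
  intro m
  induction m with
  | zero =>
    intro pre tail hpre hlen
    rw [PySem.List.pyRange_one_eq_nil (by omega)]
    have : tail = [] := List.eq_nil_of_length_eq_zero hlen
    subst this
    simp [pvFillB]
  | succ m ih =>
    intro pre tail hpre hlen
    rcases tail with _ | ⟨t, ts⟩
    · simp at hlen
    rw [PySem.List.pyRange_one_cons (by omega), List.foldl_cons]
    have hset : PySem.List.pySetD (pre ++ t :: ts) (pre.length : Int)
          (pvMinFill (pre ++ t :: ts) (pre.length : Int))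
        = pre ++ pvMinFill (pre ++ t :: ts) (pre.length : Int) :: ts := by
      rw [PySem.List.pySetD_of_nonneg _ _ (by positivity), Int.toNat_natCast]
      rw [List.set_append, if_neg (by omega)]
      rw [Nat.sub_self, List.set_cons_zero]
    rw [hset, pvFill_step_val pre ts t hpre]
    rw [pvFillB]
    set c := pvNextOk 0 (some (PySem.List.pyGetD pre (-1) 0))
        (if 2 ≤ pre.length then some (PySem.List.pyGetD pre (-2) 0) else none) with hc
    have hassoc : pre ++ c :: ts = (pre ++ [c]) ++ ts := by
      rw [List.append_assoc, List.singleton_append]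
    have hl1 : (pre ++ [c]).length = pre.length + 1 := by simp
    have hcast1 : (pre.length : Int) + 1 = (((pre ++ [c]).length : Nat) : Int) := by
      rw [hl1]
      omega
    have hcast2 : (pre.length : Int) + ((m + 1 : Nat) : Int)
        = (((pre ++ [c]).length : Nat) : Int) + ((m : Nat) : Int) := by
      rw [hl1]
      push_cast
      ring
    rw [hassoc, hcast2, hcast1]
    exact ih (pre ++ [c]) ts (by simp) (by simpa using hlen)

-- ---- the main correspondence between A's while loop and the reference outer/inner loops ----

theorem pvMain (k : Int) (orig : List Int) (hk : ∀ x ∈ orig, x < k) :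
    ∀ p, p < orig.length → ∀ v : Int, v ≤ k →
    pvFinish k (orig.length : Int) (pvLoopA k (pvSt orig p v k) (p : Int))
      = pvBreakOrNext k orig p (pvFindV k orig p v) := by
  intro p
  induction p using Nat.strong_induction_on with
  | _ p IHp =>
    intro hp
    have kcase : pvFinish k (orig.length : Int) (pvLoopA k (pvSt orig p k k) (p : Int))
        = pvOuterB k orig p := by
      rw [pvLoopA]
      rw [dif_pos (by positivity : (0 : Int) ≤ (p : Int))]
      rw [pvSt_get_self orig p k k hp, if_pos rfl]
      cases p with
      | zero =>
        rw [pvLoopA, dif_neg (by simp)]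
        simp only [pvFinish]
        rw [if_pos (by simp)]
        simp [pvOuterB]
      | succ q =>
        rw [pvSt_kstep orig q k hp]
        rw [show ((q + 1 : Nat) : Int) - 1 = ((q : Nat) : Int) from by push_cast; ring]
        rw [pvOuterB_succ, pv_getD_nat orig q (by omega)]
        exact IHp q (by omega) (by omega) _
          (by have := hk (orig[q]'(by omega)) (List.getElem_mem (by omega)); omega)
    suffices H : ∀ n : Nat, ∀ v : Int, (k - v).toNat ≤ n → v ≤ k →
        pvFinish k (orig.length : Int) (pvLoopA k (pvSt orig p v k) (p : Int))
          = pvBreakOrNext k orig p (pvFindV k orig p v) by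
      intro v hv
      exact H (k - v).toNat v le_rfl hv
    intro n
    induction n with
    | zero =>
      intro v hn hvk
      have hv : v = k := by omega
      subst hv
      rw [kcase, pvFindV, dif_neg (by omega)]
      rfl
    | succ n ihn =>
      intro v hn hvk
      by_cases hv : v = k
      · subst hv
        rw [kcase, pvFindV, dif_neg (by omega)]
        rfl
      · have hvlt : v < k := by omega
        rw [pvLoopA, dif_pos (by positivity : (0 : Int) ≤ (p : Int))]
        rw [pvSt_get_self orig p v k hp, if_neg hv]
        rw [pvFindV, dif_pos hvlt]
        by_cases hmem : v ∈ pvSliceA (pvSt orig p v k) (p : Int)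
        · rw [dif_pos ⟨hmem, by rw [pvSt_length orig p v k hp]; exact_mod_cast hp⟩]
          rw [pvSt_set_self orig p v k (v + 1) hp]
          rw [if_neg ((pvSt_slice_iff orig p v k v hp).mp hmem)]
          exact ihn (v + 1) (by omega) (by omega)
        · rw [dif_neg (fun hcon => hmem hcon.1)]
          rw [if_pos (by by_contra hC; exact hmem ((pvSt_slice_iff orig p v k v hp).mpr hC))]
          simp only [pvFinish, pvBreakOrNext]
          rw [if_neg (by omega : ¬ ((p : Nat) : Int) < 0)]
          have hassoc : pvSt orig p v k
              = (orig.take p ++ [v]) ++ List.replicate (orig.length - 1 - p) k := by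
            unfold pvSt
            rw [List.append_assoc, List.singleton_append]
          have hlenpre : (orig.take p ++ [v]).length = p + 1 := by
            simp
            omega
          have hc1 : (p : Int) + 1 = (((orig.take p ++ [v]).length : Nat) : Int) := by
            rw [hlenpre]
            push_cast
            ring
          have hc2 : ((orig.length : Nat) : Int)
              = (((orig.take p ++ [v]).length : Nat) : Int)
                + ((orig.length - 1 - p : Nat) : Int) := by
            rw [hlenpre]
            omega
          rw [hassoc, hc1, hc2]
          rw [pvFill_eq (orig.length - 1 - p) (orig.take p ++ [v])
            (List.replicate (orig.length - 1 - p) k) (by simp) (by simp)]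
          rw [show orig.length - (p + 1) = orig.length - 1 - p from by omega]

-- ---- bridge: the reference pivot search equals the closed-form pvNextOk step ----

theorem pvFindV_eq_nextOk (k : Int) (A : List Int) (p : Nat) :
    ∀ (n : Nat) (lo : Int), (k - lo).toNat ≤ n →
    pvFindV k A p lo =
      (if pvNextOk lo (pvF1 A p) (pvF2 A p) < k
       then some (pvNextOk lo (pvF1 A p) (pvF2 A p)) else none) := by
  intro n
  induction n with
  | zero =>
    intro lo hn
    rw [pvFindV, dif_neg (by omega)]
    rw [if_neg (by have := pvNextOk_ge lo (pvF1 A p) (pvF2 A p); omega)]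
  | succ n ih =>
    intro lo hn
    by_cases hlo : lo < k
    · rw [pvFindV, dif_pos hlo]
      have hiff : ((p < 1 ∨ lo ≠ PySem.List.pyGetD A ((p : Int) - 1) 0) ∧
          (p < 2 ∨ lo ≠ PySem.List.pyGetD A ((p : Int) - 2) 0)) ↔
          ¬(pvF1 A p = some lo ∨ pvF2 A p = some lo) := by
        unfold pvF1 pvF2
        by_cases h1 : 1 ≤ p <;> by_cases h2 : 2 ≤ p <;>
          simp only [h1, h2, if_true, if_false, if_pos, if_neg, Option.some.injEq,
            reduceCtorEq, or_false, false_or, not_or, not_false_iff, and_true, true_and] <;>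
          constructor <;> intro h <;>
          first
          | (constructor <;> first | omega | (intro hx; omega) | tauto)
          | tauto
          | omega
      by_cases hpred : ((p < 1 ∨ lo ≠ PySem.List.pyGetD A ((p : Int) - 1) 0) ∧
          (p < 2 ∨ lo ≠ PySem.List.pyGetD A ((p : Int) - 2) 0))
      · rw [if_pos hpred, pvNextOk_stop lo _ _ (hiff.mp hpred), if_pos hlo]
      · rw [if_neg hpred, pvNextOk_go lo _ _ (by by_contra hC; exact hpred (hiff.mpr hC))]
        exact ih (lo + 1) (by omega)
    · rw [pvFindV, dif_neg hlo]
      rw [if_neg (by have := pvNextOk_ge lo (pvF1 A p) (pvF2 A p); omega)]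

-- ---- bridge: the greedy fill is the period-3 cycle ----

def pvCyc : Int → Int → Int → Nat → List Int
  | _, _, _, 0 => []
  | a, b, c, Nat.succ m => a :: pvCyc b c a m

theorem pv_getD_snoc_neg1 (l : List Int) (x : Int) :
    PySem.List.pyGetD (l ++ [x]) (-1) 0 = x := PySem.List.pyGetD_neg_one_append_singleton l x 0

theorem pv_getD_snoc_neg2 (l : List Int) (x : Int) (h : l ≠ []) :
    PySem.List.pyGetD (l ++ [x]) (-2) 0 = PySem.List.pyGetD l (-1) 0 := by
  have hL : 1 ≤ l.length := by
    cases l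
    · exact absurd rfl h
    · simp
  rw [PySem.List.pyGetD_neg_ofNat (l ++ [x]) 2 0 (by omega) (by simp; omega)]
  rw [PySem.List.pyGetD_neg_ofNat l 1 0 (by omega) (by omega)]
  rw [List.getElem_append_left (by simp; omega)]
  congr 1
  simp

theorem pvCyc_fill : ∀ (m : Nat) (pre : List Int) (u w : Int), 2 ≤ pre.length →
    PySem.List.pyGetD pre (-2) 0 = u → PySem.List.pyGetD pre (-1) 0 = w →
    (u = 0 ∨ u = 1 ∨ u = 2) → (w = 0 ∨ w = 1 ∨ w = 2) → u ≠ w →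
    pvFillB pre m = pre ++ pvCyc (3 - u - w) u w m := by
  intro m
  induction m with
  | zero => intro pre u w _ _ _ _ _ _; simp [pvFillB, pvCyc]
  | succ m ih =>
    intro pre u w hlen hu hw hur hwr hne
    have hnil : pre ≠ [] := by intro hc; subst hc; simp at hlen
    rw [pvFillB, hu, hw, if_pos hlen]
    have he : pvNextOk 0 (some w) (some u) = 3 - u - w := by
      rw [pvNextOk2_eq]; split_ifs <;> omega
    rw [he]
    set t : Int := 3 - u - w with ht
    have h1 : PySem.List.pyGetD (pre ++ [t]) (-1) 0 = t := pv_getD_snoc_neg1 pre t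
    have h2 : PySem.List.pyGetD (pre ++ [t]) (-2) 0 = w := by
      rw [pv_getD_snoc_neg2 pre t hnil, hw]
    have := ih (pre ++ [t]) w t (by simp; omega) h2 h1 hwr (by omega) (by omega)
    rw [this]
    rw [show 3 - w - t = u from by omega]
    simp [pvCyc, List.append_assoc]

theorem pv_flatten_take : ∀ (q m : Nat) (a b c : Int), m ≤ 3 * q →
    ((List.replicate q [a, b, c]).flatten).take m = pvCyc a b c m := by
  intro q
  induction q with
  | zero =>
    intro m a b c hm
    have : m = 0 := by omega
    subst this
    simp [pvCyc]
  | succ q ih =>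
    intro m a b c hm
    rw [List.replicate_succ, List.flatten_cons]
    match m with
    | 0 => simp [pvCyc]
    | 1 => simp [pvCyc]
    | 2 => simp [pvCyc]
    | (m' + 3) =>
      show a :: b :: c :: ((List.replicate q [a, b, c]).flatten).take m' = _
      rw [ih m' a b c (by omega)]
      simp [pvCyc]

theorem pvTail_eq_cyc (m : Nat) (c1 c2 : Int) : pvTail m c1 c2 = pvCyc c1 c2 (3 - c1 - c2) m := by
  unfold pvTail
  match m with
  | 0 => simp [pvCyc]
  | 1 => simp [pvCyc]
  | 2 => simp [pvCyc]
  | (m' + 3) =>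
    rw [show min (m' + 3) 3 = 3 from by omega]
    rw [show ([c1, c2, 3 - c1 - c2]).take 3 = [c1, c2, 3 - c1 - c2] from rfl]
    exact pv_flatten_take ((m' + 3) / 3 + 1) (m' + 3) c1 c2 (3 - c1 - c2) (by omega)

-- the greedy fill starting from take p ++ [v] equals the closed-form tail of the B port
theorem pvFillB_eq_tail (A : List Int) (p : Nat) (v : Int) (m : Nat) (hp : p < A.length) :
    pvFillB (A.take p ++ [v]) m
      = A.take p ++ [v] ++ pvTail m (pvNextOk 0 (some v) (pvF1 A p))
          (pvNextOk 0 (some (pvNextOk 0 (some v) (pvF1 A p))) (some v)) := by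
  set pre := A.take p ++ [v] with hpre
  have hlenpre : pre.length = p + 1 := by rw [hpre]; simp; omega
  have hlast : PySem.List.pyGetD pre (-1) 0 = v := pv_getD_snoc_neg1 _ v
  have hif : (if 2 ≤ pre.length then some (PySem.List.pyGetD pre (-2) 0) else none) = pvF1 A p := by
    by_cases h1 : 1 ≤ p
    · rw [if_pos (by omega)]
      unfold pvF1
      rw [if_pos h1]
      congr 1
      rw [PySem.List.pyGetD_neg_ofNat pre 2 0 (by omega) (by omega)]
      rw [show ((p : Int) - 1) = ((p - 1 : Nat) : Int) from by omega]
      rw [pv_getD_nat A (p - 1) (by omega)]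
      simp only [hpre]
      rw [List.getElem_append_left (by simp; omega)]
      rw [List.getElem_take]
      congr 1
      simp
      omega
    · rw [if_neg (by omega)]
      unfold pvF1
      rw [if_neg h1]
  set c1 := pvNextOk 0 (some v) (pvF1 A p) with hc1
  set c2 := pvNextOk 0 (some c1) (some v) with hc2
  rw [pvTail_eq_cyc]
  -- peel the first two fill steps, then apply the cycle lemma
  match m with
  | 0 => simp [pvFillB, pvCyc]
  | 1 =>
    rw [pvFillB, hlast, hif, ← hc1]
    simp [pvFillB, pvCyc]
  | (m'' + 2) =>
    rw [pvFillB, hlast, hif, ← hc1]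
    rw [pvFillB]
    rw [pv_getD_snoc_neg1 pre c1]
    rw [if_pos (by simp [hlenpre])]
    rw [pv_getD_snoc_neg2 pre c1 (by rw [hpre]; simp), hlast, ← hc2]
    have hr1 := pvNextOk_mem012 v (pvF1 A p)
    rw [← hc1] at hr1
    have hr2 := pvNextOk_mem012 c1 (some v)
    rw [← hc2] at hr2
    have hne : c2 ≠ c1 := by rw [hc2]; exact pvNextOk_ne_fst c1 v hr1
    have := pvCyc_fill m'' ((pre ++ [c1]) ++ [c2]) c1 c2 (by simp)
      (by rw [pv_getD_snoc_neg2 _ c2 (by simp), pv_getD_snoc_neg1])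
      (pv_getD_snoc_neg1 _ c2) hr1 hr2 (Ne.symm hne)
    rw [this]
    simp [pvCyc, List.append_assoc]

-- ---- bridge: reference outer loop = B port's outer loop ----

theorem pvOuterB_eq_new (k : Int) (A : List Int) :
    ∀ i : Nat, i ≤ A.length → pvOuterB k A i = pvOuterNew k A i := by
  intro i
  induction i with
  | zero => intro _; rfl
  | succ p ih =>
    intro hle
    rw [pvOuterB_succ]
    rw [pvFindV_eq_nextOk k A p (k - (PySem.List.pyGetD A (p : Int) 0 + 1)).toNat _ le_rfl]
    show _ = pvOuterNew k A (p + 1)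
    rw [pvOuterNew]
    set v := pvNextOk (PySem.List.pyGetD A (p : Int) 0 + 1) (pvF1 A p) (pvF2 A p) with hv
    by_cases hvk : v < k
    · rw [if_pos hvk]
      simp only [pvBreakOrNext, if_pos hvk]
      rw [pvFillB_eq_tail A p v (A.length - (p + 1)) (by omega)]
    · rw [if_neg hvk]
      simp only [pvBreakOrNext, if_neg hvk]
      exact ih (by omega)

-- ===== VERDICT (by name: the statements are the Claim_ definitions above) =====
theorem smallestBeautifulString_spec : Claim_equal_smallestBeautifulString := by
  unfold Claim_equal_smallestBeautifulString
  intro s k _ hpre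
  unfold Spec_smallestBeautifulString
  obtain ⟨hne, hltb⟩ := hpre
  have hlt : ∀ c ∈ s.toList, (c.toNat : Int) - 97 < k := by
    intro c hc
    have := List.all_eq_true.mp hltb c hc
    simpa using this
  show pvFinish k ((pvToInts s).length : Int)
      (pvLoopA k
        (PySem.List.pySetD (pvToInts s) (((pvToInts s).length : Int) - 1)
          (PySem.List.pyGetD (pvToInts s) (((pvToInts s).length : Int) - 1) 0 + 1))
        (((pvToInts s).length : Int) - 1))
    = pvOuterNew k (pvToInts s) (pvToInts s).length
  set orig := pvToInts s with horig
  rw [← pvOuterB_eq_new k orig orig.length le_rfl]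
  have hk : ∀ x ∈ orig, x < k := by
    intro x hx
    rw [horig] at hx
    unfold pvToInts at hx
    obtain ⟨c, hc, rfl⟩ := List.mem_map.mp hx
    exact hlt c hc
  have hlen : 1 ≤ orig.length := by
    rw [horig]
    unfold pvToInts
    simp only [List.length_map]
    have hnil : s.toList ≠ [] := by simpa [String.toList_eq_nil_iff] using hne
    cases h : s.toList
    · exact absurd h hnil
    · simp
  have hN1 : ((orig.length : Int) - 1) = ((orig.length - 1 : Nat) : Int) := by omega
  rw [hN1, pv_getD_nat orig (orig.length - 1) (by omega)]
  have hset : PySem.List.pySetD orig ((orig.length - 1 : Nat) : Int)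
        (orig[orig.length - 1]'(by omega) + 1)
      = pvSt orig (orig.length - 1) (orig[orig.length - 1]'(by omega) + 1) k := by
    rw [PySem.List.pySetD_of_nonneg _ _ (by positivity), Int.toNat_natCast]
    unfold pvSt
    rw [show orig.length - 1 - (orig.length - 1) = 0 from by omega, List.replicate_zero]
    rw [List.set_eq_take_append_cons_drop, if_pos (by omega)]
    rw [show orig.length - 1 + 1 = orig.length from by omega, List.drop_length]
  rw [hset]
  rw [pvMain k orig hk (orig.length - 1) (by omega) _
    (by have := hk (orig[orig.length - 1]'(by omega)) (List.getElem_mem (by omega)); omega)]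
  conv_rhs => rw [show orig.length = (orig.length - 1) + 1 from by omega]
  rw [pvOuterB_succ, pv_getD_nat orig (orig.length - 1) (by omega)]
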